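-- pv_equiv track=rewrite | github.com/McClain-Thiel/ChatNAV | benchmark/run_muller_benchmark.py | generate_all_windows
-- ===== SOURCE A (Python) =====
-- AMINO_ACIDS = set('ACDEFGHIKLMNPQRSTVWY')
--
-- def generate_all_windows(mut_seq, wt_seq):
--     """Generate all 8-11mer windows that contain the mutation."""
--     windows = []
--     if not mut_seq or mut_seq == 'nan' or len(mut_seq) < 8:
--         return windows
--     if not wt_seq or wt_seq == 'nan':
--         wt_seq = ''
--
--     for pep_len in [8, 9, 10, 11]:
--         for start in range(len(mut_seq) - pep_len + 1):
--             pep = mut_seq[start:start + pep_len]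
--             if not all(c in AMINO_ACIDS for c in pep):
--                 continue
--             wt_pep = wt_seq[start:start + pep_len] if len(wt_seq) >= start + pep_len else ''
--             # Only keep windows that actually contain the mutation
--             if wt_pep and len(wt_pep) == len(pep) and wt_pep == pep:
--                 continue
--             windows.append((pep, wt_pep))
--     return windows
-- ===== SOURCE B (Python) =====
-- AMINO_ACIDS = set('ACDEFGHIKLMNPQRSTVWY')
--
-- def generate_all_windows(mut_seq, wt_seq):
--     """Run-decomposition version: a single pass splits mut_seq into maximal
--     runs of amino-acid characters; windows are then enumerated inside runs
--     only, so no per-window validity check exists at all.  ('' and 'nan' are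
--     shorter than 8, so the length guard covers A's extra guards.)"""
--     if len(mut_seq) < 8:
--         return []
--     if wt_seq == 'nan':
--         wt_seq = ''
--     n = len(mut_seq)
--     runs = []
--     i = 0
--     for k, c in enumerate(mut_seq):
--         if c not in AMINO_ACIDS:
--             if i < k:
--                 runs.append((i, k))
--             i = k + 1
--     if i < n:
--         runs.append((i, n))
--     windows = []
--     for pep_len in (8, 9, 10, 11):
--         for a, b in runs:
--             for start in range(a, b - pep_len + 1):
--                 pep = mut_seq[start:start + pep_len]
--                 wt_pep = wt_seq[start:start + pep_len] if len(wt_seq) >= start + pep_len else ''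
--                 if wt_pep and wt_pep == pep:
--                     continue
--                 windows.append((pep, wt_pep))
--     return windows
-- ===== Notes on version B (the rewrite author's own statement) =====
-- stated objective: faster
-- what changed: One pass decomposes mut_seq into maximal runs of amino-acid characters and windows are then enumerated inside those runs only, so the per-window validity scan of A disappears entirely; A's redundant empty/'nan' guards collapse into the single length test.
import Mathlib
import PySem

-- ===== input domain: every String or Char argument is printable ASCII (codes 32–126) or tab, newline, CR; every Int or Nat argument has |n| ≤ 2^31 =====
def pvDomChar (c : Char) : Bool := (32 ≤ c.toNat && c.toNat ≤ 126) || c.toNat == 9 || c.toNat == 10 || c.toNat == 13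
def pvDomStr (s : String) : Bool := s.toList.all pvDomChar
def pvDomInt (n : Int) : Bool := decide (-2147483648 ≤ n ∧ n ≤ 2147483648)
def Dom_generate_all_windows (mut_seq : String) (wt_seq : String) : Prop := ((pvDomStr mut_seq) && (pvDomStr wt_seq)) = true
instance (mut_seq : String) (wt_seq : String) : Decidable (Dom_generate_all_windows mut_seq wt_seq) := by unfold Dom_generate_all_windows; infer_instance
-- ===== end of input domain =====

-- B replaces A's generate-and-filter (every start tested by a per-window character scan)
-- by a run decomposition: one pass splits mut_seq into maximal runs of amino-acid
-- characters and windows are enumerated inside the runs only, with no validity check.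

-- ===== PORT A =====
-- AMINO_ACIDS = set('ACDEFGHIKLMNPQRSTVWY'): used only for membership tests, so a list with `contains` is exact
def pvAA : List Char := "ACDEFGHIKLMNPQRSTVWY".toList
def pvIsAA (c : Char) : Bool := pvAA.contains c

def generate_all_windows (mut_seq : String) (wt_seq : String) : List (String × String) :=
  let m := mut_seq.toList
  -- string comparisons and slices done on .toList (exact); slices have nonneg in-range bounds
  if m = [] ∨ m = "nan".toList ∨ m.length < 8 then []
  else
    let w := if wt_seq.toList = [] ∨ wt_seq.toList = "nan".toList then [] else wt_seq.toList
    ([8, 9, 10, 11] : List Nat).foldl (fun windows pep_len =>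
      -- range(len(mut_seq) - pep_len + 1) is empty when the bound is negative: Nat `m.length + 1 - pep_len` is exact
      (List.range (m.length + 1 - pep_len)).foldl (fun windows start =>
        let pep := (m.drop start).take pep_len       -- mut_seq[start:start+pep_len]
        if !pep.all pvIsAA then windows
        else
          let wt_pep := if start + pep_len ≤ w.length then (w.drop start).take pep_len else []
          if wt_pep ≠ [] ∧ wt_pep.length = pep.length ∧ wt_pep = pep then windows
          else windows ++ [(String.ofList pep, String.ofList wt_pep)]) windows) []

-- ===== PORT B =====
-- Source B's run-building loop `for k, c in enumerate(mut_seq): …` with its state (runs, i);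
-- enumerate is ported via List.zipIdx (exact: Python's indices here are the same Nats)
def pvRunStep (st : List (Nat × Nat) × Nat) (p : Char × Nat) : List (Nat × Nat) × Nat :=
  if pvIsAA p.1 then st
  else ((if st.2 < p.2 then st.1 ++ [(st.2, p.2)] else st.1), p.2 + 1)

-- `runs` after the loop plus the trailing `if i < n: runs.append((i, n))`
def pvRuns (m : List Char) : List (Nat × Nat) :=
  let st := m.zipIdx.foldl pvRunStep ([], 0)
  if st.2 < m.length then st.1 ++ [(st.2, m.length)] else st.1

def generate_all_windows_alt (mut_seq : String) (wt_seq : String) : List (String × String) :=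
  let m := mut_seq.toList
  if m.length < 8 then []
  else
    let w := if wt_seq.toList = "nan".toList then [] else wt_seq.toList
    let runs := pvRuns m
    ([8, 9, 10, 11] : List Nat).foldl (fun windows pep_len =>
      runs.foldl (fun windows ab =>
        -- range(a, b - pep_len + 1): starts a, a+1, …, b - pep_len; count (b+1-pep_len)-a,
        -- truncated at 0 exactly when Python's range is empty
        (List.range' ab.1 (ab.2 + 1 - pep_len - ab.1)).foldl (fun windows start =>
          let pep := (m.drop start).take pep_len
          let wt_pep := if start + pep_len ≤ w.length then (w.drop start).take pep_len else []
          if wt_pep ≠ [] ∧ wt_pep = pep then windows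
          else windows ++ [(String.ofList pep, String.ofList wt_pep)]) windows) windows) []

-- ===== PRECONDITION & SPEC =====
def Spec_generate_all_windows (mut_seq : String) (wt_seq : String) (out : List (String × String)) : Prop := out = generate_all_windows_alt mut_seq wt_seq
instance (mut_seq : String) (wt_seq : String) (out : List (String × String)) : Decidable (Spec_generate_all_windows mut_seq wt_seq out) := by unfold Spec_generate_all_windows; infer_instance

-- ===== CLAIM (what is proved, stated in full; the proofs are below) =====
def Claim_equal_generate_all_windows : Prop := ∀ (mut_seq : String) (wt_seq : String), Dom_generate_all_windows mut_seq wt_seq → Spec_generate_all_windows mut_seq wt_seq (generate_all_windows mut_seq wt_seq)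

-- ===== LEMMAS AND PROOFS =====

-- loop invariant of Source B's run-building pass, stated over the fold state (runs, i)
def pvRunInv (m : List Char) (st : List (Nat × Nat) × Nat) : Prop :=
  st.2 ≤ m.length ∧
  (∀ j, st.2 ≤ j → j < m.length → pvIsAA (m.getD j ' ') = true) ∧
  (∀ ab ∈ st.1, ab.1 < ab.2 ∧ ab.2 < st.2 ∧
     (∀ j, ab.1 ≤ j → j < ab.2 → pvIsAA (m.getD j ' ') = true) ∧
     pvIsAA (m.getD ab.2 ' ') = false) ∧
  (∀ k, k < m.length → pvIsAA (m.getD k ' ') = true →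
     st.2 ≤ k ∨ ∃ ab ∈ st.1, ab.1 ≤ k ∧ k < ab.2) ∧
  st.1.Pairwise (fun p q => p.2 < q.1)

lemma pvGetD_append_lt (m : List Char) (c : Char) (j : Nat) (h : j < m.length) :
    (m ++ [c]).getD j ' ' = m.getD j ' ' := by
  simp [List.getD, List.getElem?_append_left h]

lemma pvGetD_append_len (m : List Char) (c : Char) :
    (m ++ [c]).getD m.length ' ' = c := by
  simp [List.getD]

lemma pvRunInv_fold (m : List Char) : pvRunInv m (m.zipIdx.foldl pvRunStep ([], 0)) := by
  induction m using List.reverseRecOn with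
  | nil => simp [pvRunInv]
  | append_singleton m c ih =>
    rw [List.zipIdx_append, List.foldl_append]
    obtain ⟨h1, h2, h3, h4, h5⟩ := ih
    set st := m.zipIdx.foldl pvRunStep ([], 0) with hst
    have hlen : (m ++ [c]).length = m.length + 1 := by simp
    by_cases hc : pvIsAA c = true
    · have hkeep : (([c].zipIdx (0 + m.length))).foldl pvRunStep st = st := by
        simp [List.zipIdx, pvRunStep, hc]
      rw [hkeep]
      refine ⟨by omega, ?_, ?_, ?_, h5⟩
      · intro j hij hj
        rw [hlen] at hj
        by_cases hjm : j < m.length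
        · rw [pvGetD_append_lt m c j hjm]; exact h2 j hij hjm
        · have hje : j = m.length := by omega
          rw [hje, pvGetD_append_len]; exact hc
      · intro ab hab
        obtain ⟨ha1, ha2, ha3, ha4⟩ := h3 ab hab
        exact ⟨ha1, ha2, fun j hj1 hj2 => by
            rw [pvGetD_append_lt m c j (by omega)]; exact ha3 j hj1 hj2,
          by rw [pvGetD_append_lt m c ab.2 (by omega)]; exact ha4⟩
      · intro k hk hak
        rw [hlen] at hk
        by_cases hkm : k < m.length
        · rw [pvGetD_append_lt m c k hkm] at hak
          exact h4 k hkm hak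
        · left; omega
    · have hstep : (([c].zipIdx (0 + m.length))).foldl pvRunStep st
          = ((if st.2 < m.length then st.1 ++ [(st.2, m.length)] else st.1), m.length + 1) := by
        simp [List.zipIdx, pvRunStep, hc]
      rw [hstep]
      have hcf : pvIsAA ((m ++ [c]).getD m.length ' ') = false := by
        rw [pvGetD_append_len]; exact Bool.eq_false_iff.mpr hc
      by_cases hi : st.2 < m.length
      · rw [if_pos hi]
        refine ⟨by simp, ?_, ?_, ?_, ?_⟩
        · intro j hij hj; rw [hlen] at hj; omega
        · intro ab hab
          rcases List.mem_append.mp hab with hab' | hab'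
          · obtain ⟨ha1, ha2, ha3, ha4⟩ := h3 ab hab'
            exact ⟨ha1, by omega, fun j hj1 hj2 => by
                rw [pvGetD_append_lt m c j (by omega)]; exact ha3 j hj1 hj2,
              by rw [pvGetD_append_lt m c ab.2 (by omega)]; exact ha4⟩
          · have hab2 : ab = (st.2, m.length) := by simpa using hab'
            subst hab2
            refine ⟨hi, by omega, ?_, hcf⟩
            intro j hj1 hj2
            rw [pvGetD_append_lt m c j hj2]; exact h2 j hj1 hj2
        · intro k hk hak
          rw [hlen] at hk
          by_cases hkm : k < m.length
          · rw [pvGetD_append_lt m c k hkm] at hak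
            rcases h4 k hkm hak with hcase | ⟨ab, habm, hab1, hab2⟩
            · exact Or.inr ⟨(st.2, m.length), by simp, hcase, hkm⟩
            · exact Or.inr ⟨ab, List.mem_append.mpr (Or.inl habm), hab1, hab2⟩
          · exfalso
            have hke : k = m.length := by omega
            rw [hke] at hak
            rw [hak] at hcf
            exact Bool.noConfusion hcf
        · rw [List.pairwise_append]
          refine ⟨h5, by simp, ?_⟩
          intro p hp q hq
          have := (h3 p hp).2.1
          have hq' : q = (st.2, m.length) := by simpa using hq
          rw [hq']; omega
      · rw [if_neg hi]
        have hieq : st.2 = m.length := by omega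
        refine ⟨by simp, ?_, ?_, ?_, h5⟩
        · intro j hij hj; rw [hlen] at hj; omega
        · intro ab hab
          obtain ⟨ha1, ha2, ha3, ha4⟩ := h3 ab hab
          exact ⟨ha1, by omega, fun j hj1 hj2 => by
              rw [pvGetD_append_lt m c j (by omega)]; exact ha3 j hj1 hj2,
            by rw [pvGetD_append_lt m c ab.2 (by omega)]; exact ha4⟩
        · intro k hk hak
          rw [hlen] at hk
          by_cases hkm : k < m.length
          · rw [pvGetD_append_lt m c k hkm] at hak
            rcases h4 k hkm hak with hcase | hcase
            · omega
            · exact Or.inr hcase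
          · exfalso
            have hke : k = m.length := by omega
            rw [hke] at hak
            rw [hak] at hcf
            exact Bool.noConfusion hcf

-- the structural properties of the finished `runs` list of Source B
def pvRunsSpec (m : List Char) (R : List (Nat × Nat)) : Prop :=
  (∀ ab ∈ R, ab.1 < ab.2 ∧ ab.2 ≤ m.length ∧
     (∀ j, ab.1 ≤ j → j < ab.2 → pvIsAA (m.getD j ' ') = true) ∧
     pvIsAA (m.getD ab.2 ' ') = false) ∧
  (∀ k, k < m.length → pvIsAA (m.getD k ' ') = true → ∃ ab ∈ R, ab.1 ≤ k ∧ k < ab.2) ∧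
  R.Pairwise (fun p q => p.2 < q.1)

lemma pvRuns_spec (m : List Char) : pvRunsSpec m (pvRuns m) := by
  obtain ⟨h1, h2, h3, h4, h5⟩ := pvRunInv_fold m
  unfold pvRuns
  set st := m.zipIdx.foldl pvRunStep ([], 0) with hst
  have hend : pvIsAA (m.getD m.length ' ') = false := by
    rw [List.getD_eq_default m ' ' le_rfl]; decide
  by_cases hi : st.2 < m.length
  · rw [if_pos hi]
    refine ⟨?_, ?_, ?_⟩
    · intro ab hab
      rcases List.mem_append.mp hab with hab' | hab'
      · obtain ⟨ha1, ha2, ha3, ha4⟩ := h3 ab hab'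
        exact ⟨ha1, by omega, ha3, ha4⟩
      · have hab2 : ab = (st.2, m.length) := by simpa using hab'
        subst hab2
        exact ⟨hi, le_rfl, fun j hj1 hj2 => h2 j hj1 hj2, hend⟩
    · intro k hk hak
      rcases h4 k hk hak with hcase | ⟨ab, habm, hab1, hab2⟩
      · exact ⟨(st.2, m.length), by simp, hcase, hk⟩
      · exact ⟨ab, List.mem_append.mpr (Or.inl habm), hab1, hab2⟩
    · rw [List.pairwise_append]
      refine ⟨h5, by simp, ?_⟩
      intro p hp q hq
      have := (h3 p hp).2.1
      have hq' : q = (st.2, m.length) := by simpa using hq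
      rw [hq']; omega
  · rw [if_neg hi]
    refine ⟨?_, ?_, h5⟩
    · intro ab hab
      obtain ⟨ha1, ha2, ha3, ha4⟩ := h3 ab hab
      exact ⟨ha1, by omega, ha3, ha4⟩
    · intro k hk hak
      rcases h4 k hk hak with hcase | hcase
      · omega
      · exact hcase

-- a window is all amino acids iff it lies inside one maximal run
lemma pvWindow_mem (m : List Char) (R : List (Nat × Nat)) (h : pvRunsSpec m R)
    (L s : Nat) (hL : 1 ≤ L) :
    (s + L ≤ m.length ∧ (∀ j, s ≤ j → j < s + L → pvIsAA (m.getD j ' ') = true))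
    ↔ ∃ ab ∈ R, ab.1 ≤ s ∧ s + L ≤ ab.2 := by
  obtain ⟨r1, r2, r3⟩ := h
  constructor
  · rintro ⟨hsl, hwin⟩
    have hAAs : pvIsAA (m.getD s ' ') = true := hwin s le_rfl (by omega)
    obtain ⟨ab, habR, hab1, hab2⟩ := r2 s (by omega) hAAs
    refine ⟨ab, habR, hab1, ?_⟩
    by_contra hlt
    have hx := hwin ab.2 (by omega) (by omega)
    have hy := (r1 ab habR).2.2.2
    rw [hx] at hy
    exact Bool.noConfusion hy
  · rintro ⟨ab, habR, ha, hb⟩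
    obtain ⟨q1, q2, q3, q4⟩ := r1 ab habR
    exact ⟨by omega, fun j hj1 hj2 => q3 j (by omega) (by omega)⟩

-- `pep.all` of the slice, phrased over absolute indices
lemma pvAll_window (m : List Char) (s L : Nat) (h : s + L ≤ m.length) :
    ((m.drop s).take L).all pvIsAA = true
    ↔ ∀ j, s ≤ j → j < s + L → pvIsAA (m.getD j ' ') = true := by
  have hlen : ((m.drop s).take L).length = L := by
    simp; omega
  rw [List.all_eq_true]
  constructor
  · intro hall j hj1 hj2
    have hjm : j < m.length := by omega
    have hmem : m.getD j ' ' ∈ (m.drop s).take L := by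
      rw [List.getD_eq_getElem m ' ' hjm]
      rw [List.mem_iff_getElem]
      refine ⟨j - s, by omega, ?_⟩
      rw [List.getElem_take, List.getElem_drop]
      congr 1
      omega
    exact hall _ hmem
  · intro hwin x hx
    rw [List.mem_iff_getElem] at hx
    obtain ⟨i, hi, hx⟩ := hx
    have hiL : i < L := by omega
    have hxe : x = m.getD (s + i) ' ' := by
      rw [List.getD_eq_getElem m ' ' (by omega), ← hx]
      rw [List.getElem_take, List.getElem_drop]
    rw [hxe]
    exact hwin (s + i) (by omega) (by omega)

-- A's surviving starts, in order, are exactly the starts enumerated inside B's runs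
lemma pvStarts_eq (m : List Char) (L : Nat) (hL : 1 ≤ L) :
    (List.range (m.length + 1 - L)).filter (fun s => ((m.drop s).take L).all pvIsAA)
    = ((pvRuns m).map (fun ab => List.range' ab.1 (ab.2 + 1 - L - ab.1))).flatten := by
  obtain ⟨r1, r2, r3⟩ := pvRuns_spec m
  have hmem : ∀ s, s ∈ (List.range (m.length + 1 - L)).filter
        (fun s => ((m.drop s).take L).all pvIsAA)
      ↔ s ∈ ((pvRuns m).map (fun ab => List.range' ab.1 (ab.2 + 1 - L - ab.1))).flatten := by
    intro s
    simp only [List.mem_filter, List.mem_range, List.mem_flatten, List.mem_map]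
    constructor
    · rintro ⟨hsr, hall⟩
      have hsl : s + L ≤ m.length := by omega
      have hwin := (pvAll_window m s L hsl).mp hall
      obtain ⟨ab, habR, ha, hb⟩ :=
        (pvWindow_mem m (pvRuns m) ⟨r1, r2, r3⟩ L s hL).mp ⟨hsl, hwin⟩
      exact ⟨_, ⟨ab, habR, rfl⟩, List.mem_range'_1.mpr ⟨ha, by omega⟩⟩
    · rintro ⟨l', ⟨ab, habR, rfl⟩, hs⟩
      rw [List.mem_range'_1] at hs
      have hin := (pvWindow_mem m (pvRuns m) ⟨r1, r2, r3⟩ L s hL).mpr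
        ⟨ab, habR, hs.1, by omega⟩
      exact ⟨by omega, (pvAll_window m s L hin.1).mpr hin.2⟩
  have hpwL : ((List.range (m.length + 1 - L)).filter
      (fun s => ((m.drop s).take L).all pvIsAA)).Pairwise (· < ·) :=
    List.Pairwise.filter _ List.pairwise_lt_range
  have hpwR : (((pvRuns m).map (fun ab => List.range' ab.1 (ab.2 + 1 - L - ab.1))).flatten).Pairwise (· < ·) := by
    rw [List.pairwise_flatten]
    refine ⟨?_, ?_⟩
    · intro l' hl'
      simp only [List.mem_map] at hl'
      obtain ⟨ab, _, rfl⟩ := hl'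
      exact List.pairwise_lt_range' 1
    · rw [List.pairwise_map]
      refine r3.imp ?_
      intro p q hpq x hx y hy
      rw [List.mem_range'_1] at hx hy
      omega
  refine List.Perm.eq_of_pairwise ?_ hpwL hpwR
    ((List.perm_ext_iff_of_nodup (hpwL.imp fun h => Nat.ne_of_lt h)
      (hpwR.imp fun h => Nat.ne_of_lt h)).mpr hmem)
  intro a b _ _ hab hba
  omega

lemma pvMain (mut_seq wt_seq : String) :
    generate_all_windows mut_seq wt_seq = generate_all_windows_alt mut_seq wt_seq := by
  simp only [generate_all_windows, generate_all_windows_alt]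
  by_cases h8 : mut_seq.toList.length < 8
  · rw [if_pos (Or.inr (Or.inr h8)), if_pos h8]
  · have hA : ¬(mut_seq.toList = [] ∨ mut_seq.toList = "nan".toList ∨ mut_seq.toList.length < 8) := by
      rintro (he | he | he)
      · rw [he] at h8; simp at h8
      · rw [he] at h8; simp at h8
      · exact h8 he
    rw [if_neg hA, if_neg h8]
    have hw : (if wt_seq.toList = [] ∨ wt_seq.toList = "nan".toList then ([] : List Char) else wt_seq.toList)
        = (if wt_seq.toList = "nan".toList then ([] : List Char) else wt_seq.toList) := by
      by_cases h2 : wt_seq.toList = "nan".toList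
      · rw [if_pos (Or.inr h2), if_pos h2]
      · by_cases h1 : wt_seq.toList = []
        · rw [if_pos (Or.inl h1), if_neg h2, h1]
        · rw [if_neg (by rintro (h | h); exact h1 h; exact h2 h), if_neg h2]
    rw [hw]
    apply PySem.List.foldl_congr_mem
    intro acc pl hpl
    have hpl1 : 1 ≤ pl := by
      simp only [List.mem_cons, List.not_mem_nil, or_false] at hpl
      rcases hpl with rfl | rfl | rfl | rfl <;> norm_num
    set m := mut_seq.toList with hm
    set w := (if wt_seq.toList = "nan".toList then ([] : List Char) else wt_seq.toList) with hwdef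
    -- the shared emit step (B's inner loop body)
    set emit := fun (acc : List (String × String)) (start : Nat) =>
      let pep := (m.drop start).take pl
      let wt_pep := if start + pl ≤ w.length then (w.drop start).take pl else []
      if wt_pep ≠ [] ∧ wt_pep = pep then acc
      else acc ++ [(String.ofList pep, String.ofList wt_pep)] with hemit
    have hAside : (List.range (m.length + 1 - pl)).foldl (fun windows start =>
        let pep := (m.drop start).take pl
        if !pep.all pvIsAA then windows
        else
          let wt_pep := if start + pl ≤ w.length then (w.drop start).take pl else []
          if wt_pep ≠ [] ∧ wt_pep.length = pep.length ∧ wt_pep = pep then windows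
          else windows ++ [(String.ofList pep, String.ofList wt_pep)]) acc
        = (List.range (m.length + 1 - pl)).foldl
            (fun x y => if (fun s => ((m.drop s).take pl).all pvIsAA) y = true then emit x y else x) acc := by
      apply PySem.List.foldl_congr_mem
      intro acc' s _
      by_cases hv : ((m.drop s).take pl).all pvIsAA = true
      · have hcond : ∀ (W P : List Char),
            (W ≠ [] ∧ W.length = P.length ∧ W = P) ↔ (W ≠ [] ∧ W = P) := by
          intro W P
          constructor
          · rintro ⟨a, _, c⟩; exact ⟨a, c⟩
          · rintro ⟨a, c⟩; exact ⟨a, by rw [c], c⟩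
        simp only [hv, Bool.not_true, Bool.false_eq_true, if_false, if_true, hemit, hcond]
      · rw [Bool.not_eq_true] at hv
        simp only [hv, Bool.not_false, if_true, Bool.false_eq_true, if_false]
    rw [hAside, ← List.foldl_filter, pvStarts_eq m pl hpl1, List.foldl_flatten, List.foldl_map]
  

-- ===== VERDICT (by name: the statement is the Claim_ definition above) =====
theorem generate_all_windows_spec : Claim_equal_generate_all_windows := by
  intro mut_seq wt_seq _
  exact pvMain mut_seq wt_seq
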